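-- pv_equiv track=rewrite | github.com/GundalaNikhil/DSA | dsa-problems/Bitwise/testcases/generate_all_16_complete.py | sol_009
-- ===== SOURCE A (Python) =====
-- def sol_009(a):
--     """BIT-009: Smallest Absent XOR"""
--     basis = [0] * 30
--     for x in a:
--         cur = x
--         for i in range(29, -1, -1):
--             if not (cur & (1 << i)):
--                 continue
--             if basis[i] == 0:
--                 basis[i] = cur
--                 break
--             cur ^= basis[i]
--
--     for i in range(30):
--         if basis[i] == 0:
--             return 1 << i
--     return 1 << 30
-- ===== SOURCE B (Python) =====
-- def sol_009(a):
--     """BIT-009: Smallest Absent XOR (bit-major Gaussian elimination)"""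
--     rows = list(a)
--     pivot = [False] * 30
--     for i in range(29, -1, -1):
--         pv = 0
--         rest = []
--         for r in rows:
--             if r & (1 << i):
--                 if pv:
--                     rest.append(r ^ pv)
--                 else:
--                     pv = r
--             else:
--                 rest.append(r)
--         if pv:
--             pivot[i] = True
--         rows = rest
--     for i in range(30):
--         if not pivot[i]:
--             return 1 << i
--     return 1 << 30
-- ===== Notes on version B (the rewrite author's own statement) =====
-- stated objective: alternative
-- what changed: A inserts each element into a bit-indexed reduction basis (element-major greedy insertion); B performs bit-major Gaussian elimination, scanning bits 29..0, taking the first row with the current bit as pivot and xoring it into the other rows of a shrinking row list, then reads the smallest unpivoted bit.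
import Mathlib
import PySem

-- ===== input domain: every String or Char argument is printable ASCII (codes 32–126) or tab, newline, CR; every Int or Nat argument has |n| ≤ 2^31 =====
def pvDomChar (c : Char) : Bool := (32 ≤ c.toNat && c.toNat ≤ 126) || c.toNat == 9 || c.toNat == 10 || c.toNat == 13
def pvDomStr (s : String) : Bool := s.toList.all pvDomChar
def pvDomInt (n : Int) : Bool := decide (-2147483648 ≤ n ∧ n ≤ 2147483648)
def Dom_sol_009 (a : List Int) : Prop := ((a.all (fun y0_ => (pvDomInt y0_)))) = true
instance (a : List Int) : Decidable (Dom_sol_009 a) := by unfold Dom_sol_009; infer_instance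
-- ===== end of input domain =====

-- B replaces A's element-major greedy basis insertion by bit-major Gaussian elimination over a
-- shrinking row list (alternative algorithm, same cost class); return values agree on all inputs.

-- ===== PORT A =====
-- inner `for i in range(29,-1,-1)` loop of A: reduce cur against basis, counting i down
def insA (basis : List Int) (cur : Int) : Nat → List Int
  | 0 =>
    if PySem.Int.band cur ((1:Int) <<< (0:Nat)) = 0 then basis
    else if basis.getD 0 0 = 0 then basis.set 0 cur
    else basis
  | (j+1) =>
    if PySem.Int.band cur ((1:Int) <<< (j+1)) = 0 then insA basis cur j
    else if basis.getD (j+1) 0 = 0 then basis.set (j+1) cur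
    else insA basis (PySem.Int.bxor cur (basis.getD (j+1) 0)) j

-- final `for i in range(30)` scan of A
def findA (basis : List Int) (i : Nat) : Int :=
  if i < 30 then
    (if basis.getD i 0 = 0 then (1:Int) <<< i else findA basis (i+1))
  else (1:Int) <<< (30:Nat)
termination_by 30 - i

def sol_009 (a : List Int) : Int :=
  findA (a.foldl (fun b x => insA b x 29) (List.replicate 30 (0:Int))) 0

-- ===== PORT B =====
-- body of B's inner `for r in rows` loop: state = (pivot found so far, rows kept)
def stepB (i : Nat) (pr : Int × List Int) (r : Int) : Int × List Int :=
  if PySem.Int.band r ((1:Int) <<< i) ≠ 0 then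
    (if pr.1 ≠ 0 then (pr.1, pr.2 ++ [PySem.Int.bxor r pr.1]) else (r, pr.2))
  else (pr.1, pr.2 ++ [r])

-- one stage of B: scan rows once, pick the first row with bit i as pivot pv, xor it into later
-- rows having bit i, pass the others through
def stageB (i : Nat) (rows : List Int) : Int × List Int :=
  rows.foldl (stepB i) ((0:Int), ([] : List Int))

-- B's `for i in range(29,-1,-1)` elimination loop
def elimB (rows : List Int) (pivot : List Bool) : Nat → List Bool × List Int
  | 0 =>
    let s := stageB 0 rows
    ((if s.1 ≠ 0 then pivot.set 0 true else pivot), s.2)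
  | (j+1) =>
    let s := stageB (j+1) rows
    elimB s.2 (if s.1 ≠ 0 then pivot.set (j+1) true else pivot) j

-- final `for i in range(30)` scan of B
def findB (pivot : List Bool) (i : Nat) : Int :=
  if i < 30 then
    (if !(pivot.getD i false) then (1:Int) <<< i else findB pivot (i+1))
  else (1:Int) <<< (30:Nat)
termination_by 30 - i

def sol_009_alt (a : List Int) : Int :=
  findB (elimB a (List.replicate 30 false) 29).1 0

-- ===== PRECONDITION & SPEC =====
def Spec_sol_009 (a : List Int) (out : Int) : Prop := out = sol_009_alt a
instance (a : List Int) (out : Int) : Decidable (Spec_sol_009 a out) := by unfold Spec_sol_009; infer_instance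

-- ===== CLAIM (what is proved, stated in full; the proofs are below) =====
def Claim_equal_sol_009 : Prop := ∀ (a : List Int), Dom_sol_009 a → Spec_sol_009 a (sol_009 a)

-- ===== LEMMAS AND PROOFS =====

-- `tb x i` = bit i of x in Python's infinite two's complement
def tb (x : Int) (i : Nat) : Bool := if 0 ≤ x then x.toNat.testBit i else !((-x-1).toNat.testBit i)

-- the projection of x onto bits 0..29, as a finite set of bit positions
def vec (x : Int) : Finset (Fin 30) := Finset.univ.filter (fun i => tb x i.val)

theorem tb_bxor (x y : Int) (i : Nat) :
    tb (PySem.Int.bxor x y) i = xor (tb x i) (tb y i) := by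
  unfold tb PySem.Int.bxor
  rcases le_or_gt 0 x with hx | hx <;> rcases le_or_gt 0 y with hy | hy
  · rw [if_pos hx, if_pos hy, if_pos hx, if_pos hy,
      if_pos (by positivity : (0:Int) ≤ ((x.toNat ^^^ y.toNat : Nat) : Int))]
    rw [show (((x.toNat ^^^ y.toNat : Nat) : Int)).toNat = x.toNat ^^^ y.toNat by omega]
    rw [Nat.testBit_xor]
  · rw [if_pos hx, if_neg (not_le.2 hy), if_pos hx, if_neg (not_le.2 hy)]
    have hc : ((x.toNat ^^^ (-y - 1).toNat : Nat) : Int) ≥ 0 := by positivity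
    rw [if_neg (by omega : ¬ (0:Int) ≤ -((x.toNat ^^^ (-y - 1).toNat : Nat) : Int) - 1)]
    rw [show (-(-((x.toNat ^^^ (-y - 1).toNat : Nat) : Int) - 1) - 1).toNat
        = x.toNat ^^^ (-y - 1).toNat by omega]
    rw [Nat.testBit_xor]
    cases x.toNat.testBit i <;> cases (-y - 1).toNat.testBit i <;> simp
  · rw [if_neg (not_le.2 hx), if_pos hy, if_neg (not_le.2 hx), if_pos hy]
    have hc : (((-x - 1).toNat ^^^ y.toNat : Nat) : Int) ≥ 0 := by positivity
    rw [if_neg (by omega : ¬ (0:Int) ≤ -(((-x - 1).toNat ^^^ y.toNat : Nat) : Int) - 1)]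
    rw [show (-(-(((-x - 1).toNat ^^^ y.toNat : Nat) : Int) - 1) - 1).toNat
        = (-x - 1).toNat ^^^ y.toNat by omega]
    rw [Nat.testBit_xor]
    cases (-x - 1).toNat.testBit i <;> cases y.toNat.testBit i <;> simp
  · rw [if_neg (not_le.2 hx), if_neg (not_le.2 hy), if_neg (not_le.2 hx), if_neg (not_le.2 hy)]
    rw [if_pos (by positivity : (0:Int) ≤ (((-x - 1).toNat ^^^ (-y - 1).toNat : Nat) : Int))]
    rw [show ((((-x - 1).toNat ^^^ (-y - 1).toNat : Nat) : Int)).toNat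
        = (-x - 1).toNat ^^^ (-y - 1).toNat by omega]
    rw [Nat.testBit_xor]
    cases (-x - 1).toNat.testBit i <;> cases (-y - 1).toNat.testBit i <;> simp

theorem band_pow_eq_zero (x : Int) (i : Nat) :
    (PySem.Int.band x ((1:Int) <<< i) = 0) ↔ tb x i = false := by
  have hb : ((1:Int) <<< i) = ((2^i : Nat) : Int) := by simp [Int.shiftLeft_eq]
  rw [hb]
  unfold tb PySem.Int.band
  rcases le_or_gt 0 x with hx | hx
  · rw [if_pos hx, if_pos hx, if_pos (by positivity : (0:Int) ≤ ((2^i : Nat) : Int))]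
    rw [show (((2^i : Nat) : Int)).toNat = 2^i from Int.toNat_natCast _, Nat.and_two_pow]
    cases h : x.toNat.testBit i <;> simp
  · rw [if_neg (not_le.2 hx), if_neg (not_le.2 hx), if_pos (by positivity : (0:Int) ≤ ((2^i : Nat) : Int))]
    rw [show (((2^i : Nat) : Int)).toNat = 2^i from Int.toNat_natCast _]
    rw [Nat.and_comm, Nat.and_two_pow]
    cases h : (-x - 1).toNat.testBit i <;> simp

theorem tb_zero (i : Nat) : tb 0 i = false := by simp [tb]

theorem mem_vec {x : Int} {i : Fin 30} : i ∈ vec x ↔ tb x i.val = true := by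
  simp [vec]

theorem vec_bxor (x y : Int) : vec (PySem.Int.bxor x y) = symmDiff (vec x) (vec y) := by
  ext i
  simp only [mem_vec, Finset.mem_symmDiff, tb_bxor, mem_vec]
  cases h1 : tb x i.val <;> cases h2 : tb y i.val <;> simp

-- span of a list of bit-vectors under symmetric difference
inductive Spn (L : List (Finset (Fin 30))) : Finset (Fin 30) → Prop
  | nil : Spn L ∅
  | step {v w : Finset (Fin 30)} : v ∈ L → Spn L w → Spn L (symmDiff v w)

theorem Spn.single {L : List (Finset (Fin 30))} {v : Finset (Fin 30)} (h : v ∈ L) : Spn L v := by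
  have := Spn.step h Spn.nil
  simpa [← Finset.bot_eq_empty, symmDiff_bot] using this

theorem Spn.xor {L : List (Finset (Fin 30))} {u v : Finset (Fin 30)}
    (hu : Spn L u) (hv : Spn L v) : Spn L (symmDiff u v) := by
  induction hu with
  | nil => simpa [← Finset.bot_eq_empty, bot_symmDiff] using hv
  | step hm _ ih => rename_i a w
                    have := Spn.step hm ih
                    simpa [symmDiff_assoc] using this

theorem Spn.mono {L L' : List (Finset (Fin 30))} (h : ∀ v ∈ L, Spn L' v) {w : Finset (Fin 30)}
    (hw : Spn L w) : Spn L' w := by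
  induction hw with
  | nil => exact Spn.nil
  | step hm _ ih => exact Spn.xor (h _ hm) ih

theorem Spn.sub {L L' : List (Finset (Fin 30))} (h : ∀ v ∈ L, v ∈ L') {w : Finset (Fin 30)}
    (hw : Spn L w) : Spn L' w :=
  Spn.mono (fun v hv => Spn.single (h v hv)) hw

theorem Spn.cons_elim {u : Finset (Fin 30)} {L : List (Finset (Fin 30))} {v : Finset (Fin 30)}
    (h : Spn (u :: L) v) : Spn L v ∨ Spn L (symmDiff u v) := by
  induction h with
  | nil => exact Or.inl Spn.nil
  | @step a w hm _ ih =>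
      rcases List.mem_cons.1 hm with rfl | haL
      · rcases ih with ihw | ihw
        · exact Or.inr (by simpa [← symmDiff_assoc, symmDiff_self, bot_symmDiff,
            ← Finset.bot_eq_empty] using ihw)
        · exact Or.inl ihw
      · rcases ih with ihw | ihw
        · exact Or.inl (Spn.step haL ihw)
        · exact Or.inr (by rw [symmDiff_left_comm u a w]; exact Spn.step haL ihw)

theorem Spn.region {L : List (Finset (Fin 30))} {S : Finset (Fin 30)}
    (h : ∀ v ∈ L, v ⊆ S) {w : Finset (Fin 30)} (hw : Spn L w) : w ⊆ S := by
  induction hw with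
  | nil => simp
  | step hm _ ih =>
      rename_i a b
      intro x hx
      rcases Finset.mem_symmDiff.1 hx with ⟨hx1, _⟩ | ⟨hx1, _⟩
      · exact h _ hm hx1
      · exact ih hx1

-- fold of symmetric difference over a list
def xorL : List (Finset (Fin 30)) → Finset (Fin 30)
  | [] => ∅
  | v :: s => symmDiff v (xorL s)

theorem xorL_perm {s t : List (Finset (Fin 30))} (h : s.Perm t) : xorL s = xorL t := by
  induction h with
  | nil => rfl
  | cons x _ ih => simp [xorL, ih]
  | swap x y l => simp [xorL, ← symmDiff_assoc, symmDiff_comm x y]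
  | trans _ _ ih1 ih2 => exact ih1.trans ih2

theorem spn_normal {L : List (Finset (Fin 30))} {v : Finset (Fin 30)} (h : Spn L v) :
    ∃ s : List (Finset (Fin 30)), (∀ u ∈ s, u ∈ L) ∧ s.Nodup ∧ v = xorL s := by
  induction h with
  | nil => exact ⟨[], by simp, List.nodup_nil, rfl⟩
  | @step a w hm _ ih =>
      obtain ⟨s, hsub, hnd, rfl⟩ := ih
      by_cases ha : a ∈ s
      · refine ⟨s.erase a, fun u hu => hsub u (List.mem_of_mem_erase hu), hnd.erase _, ?_⟩
        rw [xorL_perm (List.perm_cons_erase ha)]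
        simp [xorL, ← symmDiff_assoc, symmDiff_self, bot_symmDiff, ← Finset.bot_eq_empty]
      · exact ⟨a :: s, by
          intro u hu
          rcases List.mem_cons.1 hu with rfl | hu
          · exact hm
          · exact hsub u hu, List.nodup_cons.2 ⟨ha, hnd⟩, rfl⟩

theorem max_symmDiff {u w : Finset (Fin 30)} (h : u.max < w.max) :
    (symmDiff u w).max = w.max := by
  rcases hM : w.max with _ | M
  · rw [hM] at h; exact absurd h not_lt_bot
  · rw [hM] at h
    have hMw : M ∈ w := Finset.mem_of_max hM
    have hMu : M ∉ u := fun hMu => absurd (Finset.le_max hMu) (not_le.2 h)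
    have hmem : M ∈ symmDiff u w := Finset.mem_symmDiff.2 (Or.inr ⟨hMw, hMu⟩)
    refine le_antisymm (Finset.max_le ?_) (Finset.le_max hmem)
    intro b hb
    rcases Finset.mem_symmDiff.1 hb with ⟨hbu, _⟩ | ⟨hbw, _⟩
    · exact le_trans (Finset.le_max hbu) (le_of_lt h)
    · exact hM ▸ Finset.le_max hbw

theorem xorL_max {s : List (Finset (Fin 30))} (hne : s ≠ [])
    (hp : s.Pairwise (fun u w => u.max ≠ w.max)) (h0 : ∀ u ∈ s, u ≠ ∅) :
    ∃ u ∈ s, (xorL s).max = u.max := by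
  induction s with
  | nil => exact absurd rfl hne
  | cons u s ih =>
      rcases eq_or_ne s [] with rfl | hs
      · exact ⟨u, List.mem_cons_self, by
          simp [xorL, symmDiff_bot, ← Finset.bot_eq_empty]⟩
      · obtain ⟨u0, hu0, hmax⟩ := ih hs (hp.of_cons) (fun v hv => h0 v (List.mem_cons_of_mem _ hv))
        have hne' : u.max ≠ (xorL s).max := by
          rw [hmax]
          exact (List.pairwise_cons.1 hp).1 u0 hu0
        rcases lt_or_gt_of_ne hne' with hlt | hgt
        · exact ⟨u0, List.mem_cons_of_mem _ hu0, by
            show (xorL (u :: s)).max = _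
            rw [show xorL (u :: s) = symmDiff u (xorL s) from rfl, max_symmDiff hlt, hmax]⟩
        · exact ⟨u, List.mem_cons_self, by
            show (xorL (u :: s)).max = _
            rw [show xorL (u :: s) = symmDiff u (xorL s) from rfl, symmDiff_comm,
              max_symmDiff hgt]⟩

-- ===== A-side invariants =====

def bv (basis : List Int) : List (Finset (Fin 30)) :=
  (List.range 30).filterMap (fun i => if basis.getD i 0 = 0 then none else some (vec (basis.getD i 0)))

def goodBasis (basis : List Int) : Prop :=
  basis.length = 30 ∧ ∀ i : Nat, ∀ h : i < 30,
    basis.getD i 0 = 0 ∨ (vec (basis.getD i 0)).max = some ⟨i, h⟩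

def LeadIn (G : List (Finset (Fin 30))) (m : Fin 30) : Prop :=
  ∃ v, Spn G v ∧ v.max = some m


theorem tb_ne_zero {x : Int} {i : Nat} (h : tb x i = true) : x ≠ 0 := by
  intro h0; rw [h0, tb_zero] at h; exact Bool.false_ne_true h

theorem getD_set_self {α : Type} {l : List α} {i : Nat} {d : α} (h : i < l.length) (c : α) :
    (l.set i c).getD i d = c := by
  simp [List.getD_eq_getElem?_getD, List.getElem?_set_self, h]

theorem getD_set_ne {α : Type} {l : List α} {i j : Nat} {d : α} (h : i ≠ j) (c : α) :
    (l.set i c).getD j d = l.getD j d := by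
  simp [List.getD_eq_getElem?_getD, List.getElem?_set_ne, h]

theorem mem_bv {basis : List Int} {u : Finset (Fin 30)} :
    u ∈ bv basis ↔ ∃ i : Nat, i < 30 ∧ basis.getD i 0 ≠ 0 ∧ u = vec (basis.getD i 0) := by
  constructor
  · intro h
    obtain ⟨i, hi, hu⟩ := List.mem_filterMap.1 h
    rw [List.mem_range] at hi
    by_cases h0 : basis.getD i 0 = 0
    · rw [if_pos h0] at hu; exact absurd hu (by simp)
    · rw [if_neg h0] at hu
      exact ⟨i, hi, h0, (Option.some_injective _ hu).symm⟩
  · rintro ⟨i, hi, h0, rfl⟩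
    exact List.mem_filterMap.2 ⟨i, List.mem_range.2 hi, by rw [if_neg h0]⟩

-- bits of a vector are bounded by its max
theorem tb_false_of_max {x : Int} {i : Nat} {hi : i < 30} {j : Nat}
    (hmax : (vec x).max = some ⟨i, hi⟩) (hij : i < j) (hj : j < 30) : tb x j = false := by
  by_contra h
  have hj' : (⟨j, hj⟩ : Fin 30) ∈ vec x := mem_vec.2 (by simpa using h)
  have := Finset.le_max hj'
  rw [hmax] at this
  exact absurd (WithBot.coe_le_coe.1 this) (by simp [Fin.le_def]; omega)

theorem tb_true_of_max {x : Int} {i : Nat} {hi : i < 30}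
    (hmax : (vec x).max = some ⟨i, hi⟩) : tb x i = true := by
  have := Finset.mem_of_max hmax
  simpa using mem_vec.1 this

-- a vector whose bits all sit at positions ≤ k, with bit k set, has max = k
theorem vec_max_eq {x : Int} {k : Nat} (hk : k < 30)
    (hhi : ∀ j, k < j → j < 30 → tb x j = false) (hbit : tb x k = true) :
    (vec x).max = some ⟨k, hk⟩ := by
  refine le_antisymm (Finset.max_le ?_) (Finset.le_max (mem_vec.2 hbit))
  intro b hb
  have hbt := mem_vec.1 hb
  rcases le_or_gt b.val k with hle | hgt
  · exact WithBot.coe_le_coe.2 (by simpa [Fin.le_def] using hle)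
  · rw [hhi b.val hgt b.isLt] at hbt; exact absurd hbt (by simp)

-- what storing cur into an empty slot k does to the basis invariants
theorem setStep (k : Nat) (hk : k < 30) (basis : List Int) (cur x : Int)
    (hg : goodBasis basis)
    (hhi : ∀ j, k < j → j < 30 → tb cur j = false)
    (hbit : tb cur k = true)
    (h0 : basis.getD k 0 = 0)
    (hc : Spn (vec x :: bv basis) (vec cur))
    (hx : Spn (bv basis) (symmDiff (vec cur) (vec x))) :
    goodBasis (basis.set k cur) ∧
    (∀ j, basis.getD j 0 ≠ 0 → (basis.set k cur).getD j 0 = basis.getD j 0) ∧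
    (∀ u ∈ bv (basis.set k cur), Spn (vec x :: bv basis) u) ∧
    Spn (bv (basis.set k cur)) (vec x) := by
  have hlen : k < basis.length := by rw [hg.1]; exact hk
  have hself : (basis.set k cur).getD k 0 = cur := getD_set_self hlen cur
  have hpres : ∀ j, basis.getD j 0 ≠ 0 → (basis.set k cur).getD j 0 = basis.getD j 0 := by
    intro j hj
    rcases eq_or_ne k j with rfl | hne
    · exact absurd h0 hj
    · exact getD_set_ne hne cur
  have hsub : ∀ u ∈ bv basis, u ∈ bv (basis.set k cur) := by
    intro u hu
    obtain ⟨i, hi, hne, rfl⟩ := mem_bv.1 hu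
    exact mem_bv.2 ⟨i, hi, by rw [hpres i hne]; exact hne, by rw [hpres i hne]⟩
  have hcur_mem : vec cur ∈ bv (basis.set k cur) :=
    mem_bv.2 ⟨k, hk, by rw [hself]; exact tb_ne_zero hbit, by rw [hself]⟩
  refine ⟨⟨by rw [List.length_set]; exact hg.1, ?_⟩, hpres, ?_, ?_⟩
  · intro i hi
    rcases eq_or_ne k i with rfl | hne
    · rw [hself]; exact Or.inr (vec_max_eq hk hhi hbit)
    · rw [getD_set_ne hne cur]; exact hg.2 i hi
  · intro u hu
    obtain ⟨i, hi, hne, rfl⟩ := mem_bv.1 hu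
    rcases eq_or_ne k i with rfl | hki
    · rw [hself]; exact hc
    · rw [getD_set_ne hki cur] at hne ⊢
      exact Spn.single (List.mem_cons_of_mem _ (mem_bv.2 ⟨i, hi, hne, rfl⟩))
  · have h1 : Spn (bv (basis.set k cur)) (symmDiff (vec cur) (vec x)) :=
      Spn.sub hsub hx
    have := Spn.xor (Spn.single hcur_mem) h1
    simpa [← symmDiff_assoc, symmDiff_self, bot_symmDiff, ← Finset.bot_eq_empty] using this

-- main insertion lemma for A's inner loop
theorem insA_spec (k : Nat) (hk : k < 30) (basis : List Int) (cur x : Int)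
    (hg : goodBasis basis)
    (hhi : ∀ j, k < j → j < 30 → tb cur j = false)
    (hc : Spn (vec x :: bv basis) (vec cur))
    (hx : Spn (bv basis) (symmDiff (vec cur) (vec x))) :
    goodBasis (insA basis cur k) ∧
    (∀ j, basis.getD j 0 ≠ 0 → (insA basis cur k).getD j 0 = basis.getD j 0) ∧
    (∀ u ∈ bv (insA basis cur k), Spn (vec x :: bv basis) u) ∧
    Spn (bv (insA basis cur k)) (vec x) := by
  induction k generalizing basis cur with
  | zero =>
      by_cases hb : PySem.Int.band cur ((1:Int) <<< (0:Nat)) = 0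
      · have hcur0 : vec cur = ∅ := by
          ext b
          simp only [mem_vec, Finset.notMem_empty, iff_false]
          rcases Nat.eq_zero_or_pos b.val with hb0 | hbpos
          · rw [hb0]; simp [(band_pow_eq_zero _ _).1 hb]
          · simp [hhi b.val hbpos b.isLt]
        rw [show insA basis cur 0 = basis from by simp only [insA]; rw [if_pos hb]]
        refine ⟨hg, fun j _ => rfl, fun u hu => Spn.single (List.mem_cons_of_mem _ hu), ?_⟩
        have := hx
        rw [hcur0] at this
        simpa [← Finset.bot_eq_empty, bot_symmDiff] using this
      · have hbit : tb cur 0 = true := by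
          rcases Bool.eq_false_or_eq_true (tb cur 0) with h | h
          · exact h
          · exact absurd ((band_pow_eq_zero _ _).2 h) hb
        by_cases h0 : basis.getD 0 0 = 0
        · rw [show insA basis cur 0 = basis.set 0 cur from by simp only [insA]; rw [if_neg hb, if_pos h0]]
          exact setStep 0 (by norm_num) basis cur x hg hhi hbit h0 hc hx
        · rw [show insA basis cur 0 = basis from by simp only [insA]; rw [if_neg hb, if_neg h0]]
          have hmax0 : (vec (basis.getD 0 0)).max = some ⟨0, by norm_num⟩ :=
            (hg.2 0 (by norm_num)).resolve_left h0
          have hcmax : (vec cur).max = some ⟨0, by norm_num⟩ :=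
            vec_max_eq (by norm_num) hhi hbit
          have hsing : ∀ (v : Finset (Fin 30)), v.max = some ⟨0, by norm_num⟩ →
              v = {⟨0, by norm_num⟩} := by
            intro v hv
            ext b
            simp only [Finset.mem_singleton]
            constructor
            · intro hbv
              have := Finset.le_max hbv
              rw [hv] at this
              have hb0 := WithBot.coe_le_coe.1 this
              exact le_antisymm hb0 (by simp [Fin.le_def])
            · rintro rfl; exact Finset.mem_of_max hv
          have hveq : vec cur = vec (basis.getD 0 0) := by
            rw [hsing _ hcmax, hsing _ hmax0]
          refine ⟨hg, fun j _ => rfl, fun u hu => Spn.single (List.mem_cons_of_mem _ hu), ?_⟩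
          have hb0mem : vec (basis.getD 0 0) ∈ bv basis := mem_bv.2 ⟨0, by norm_num, h0, rfl⟩
          have := Spn.xor (Spn.single hb0mem) hx
          rw [← hveq] at this
          simpa [← symmDiff_assoc, symmDiff_self, bot_symmDiff, ← Finset.bot_eq_empty] using this
  | succ j ih =>
      have hj30 : j < 30 := by omega
      by_cases hb : PySem.Int.band cur ((1:Int) <<< (j+1)) = 0
      · rw [show insA basis cur (j+1) = insA basis cur j from by simp only [insA]; rw [if_pos hb]]
        refine ih hj30 basis cur hg ?_ hc hx
        intro j' hj' hj30'
        rcases eq_or_ne j' (j+1) with rfl | hne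
        · exact (band_pow_eq_zero _ _).1 hb
        · exact hhi j' (by omega) hj30'
      · have hbit : tb cur (j+1) = true := by
          rcases Bool.eq_false_or_eq_true (tb cur (j+1)) with h | h
          · exact h
          · exact absurd ((band_pow_eq_zero _ _).2 h) hb
        by_cases h0 : basis.getD (j+1) 0 = 0
        · rw [show insA basis cur (j+1) = basis.set (j+1) cur from by simp only [insA]; rw [if_neg hb, if_pos h0]]
          exact setStep (j+1) hk basis cur x hg hhi hbit h0 hc hx
        · rw [show insA basis cur (j+1)
              = insA basis (PySem.Int.bxor cur (basis.getD (j+1) 0)) j from by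
                simp only [insA]; rw [if_neg hb, if_neg h0]]
          have hmax : (vec (basis.getD (j+1) 0)).max = some ⟨j+1, hk⟩ :=
            (hg.2 (j+1) hk).resolve_left h0
          have hbmem : vec (basis.getD (j+1) 0) ∈ bv basis := mem_bv.2 ⟨j+1, hk, h0, rfl⟩
          refine ih hj30 basis (PySem.Int.bxor cur (basis.getD (j+1) 0)) hg ?_ ?_ ?_
          · intro j' hj' hj30'
            rw [tb_bxor]
            rcases eq_or_ne j' (j+1) with rfl | hne
            · rw [hbit, tb_true_of_max hmax]; rfl
            · rw [hhi j' (by omega) hj30', tb_false_of_max hmax (by omega) hj30']; rfl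
          · rw [vec_bxor]
            exact Spn.xor hc (Spn.single (List.mem_cons_of_mem _ hbmem))
          · rw [vec_bxor, symmDiff_right_comm]
            exact Spn.xor hx (Spn.single hbmem)

-- ===== A: fold invariant and characterization =====

theorem foldA_inv (a : List Int) : ∀ (p basis : List Int),
    goodBasis basis →
    (∀ u ∈ bv basis, Spn (p.map vec) u) →
    (∀ y ∈ p, Spn (bv basis) (vec y)) →
    goodBasis (a.foldl (fun b x => insA b x 29) basis) ∧
    (∀ u ∈ bv (a.foldl (fun b x => insA b x 29) basis), Spn ((p ++ a).map vec) u) ∧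
    (∀ y ∈ p ++ a, Spn (bv (a.foldl (fun b x => insA b x 29) basis)) (vec y)) := by
  induction a with
  | nil => intro p basis hg hc hd; simpa using ⟨hg, hc, hd⟩
  | cons x a ih =>
      intro p basis hg hc hd
      obtain ⟨g1, pres1, c1, d1⟩ :=
        insA_spec 29 (by norm_num) basis x x hg (fun j h1 h2 => absurd h1 (by omega))
          (Spn.single List.mem_cons_self)
          (by rw [symmDiff_self]; exact (Finset.bot_eq_empty (α := Fin 30)) ▸ Spn.nil)
      have hsub1 : ∀ u ∈ bv basis, u ∈ bv (insA basis x 29) := by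
        intro u hu
        obtain ⟨i, hi, hne, rfl⟩ := mem_bv.1 hu
        exact mem_bv.2 ⟨i, hi, by rw [pres1 i hne]; exact hne, by rw [pres1 i hne]⟩
      have hc1 : ∀ u ∈ bv (insA basis x 29), Spn ((p ++ [x]).map vec) u := by
        intro u hu
        refine Spn.mono ?_ (c1 u hu)
        intro g hg'
        rcases List.mem_cons.1 hg' with rfl | hg'
        · exact Spn.single (by simp)
        · refine Spn.sub ?_ (hc g hg')
          intro w hw
          rw [List.map_append]
          exact List.mem_append_left _ hw
      have hd1 : ∀ y ∈ p ++ [x], Spn (bv (insA basis x 29)) (vec y) := by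
        intro y hy
        rcases List.mem_append.1 hy with hy | hy
        · exact Spn.sub hsub1 (hd y hy)
        · rw [List.mem_singleton.1 hy]; exact d1
      have := ih (p ++ [x]) (insA basis x 29) g1 hc1 hd1
      simpa using this

theorem getD_replicate0 {i : Nat} : (List.replicate 30 (0:Int)).getD i 0 = 0 := by
  rcases lt_or_ge i 30 with h | h
  · rw [List.getD_eq_getElem?_getD, List.getElem?_replicate, if_pos h]; rfl
  · rw [List.getD_eq_getElem?_getD, List.getElem?_eq_none (by simpa using h)]; rfl

theorem goodBasis_init : goodBasis (List.replicate 30 (0:Int)) := by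
  constructor
  · simp
  · intro i hi
    exact Or.inl getD_replicate0

theorem bv_init : bv (List.replicate 30 (0:Int)) = [] := by
  apply List.eq_nil_iff_forall_not_mem.2
  intro u hu
  obtain ⟨i, hi, hne, _⟩ := mem_bv.1 hu
  exact hne getD_replicate0

-- every nonzero final-basis vector sits in bv with max equal to its slot
theorem bv_max {basis : List Int} (hg : goodBasis basis) {u : Finset (Fin 30)}
    (hu : u ∈ bv basis) :
    ∃ i : Nat, ∃ h : i < 30, basis.getD i 0 ≠ 0 ∧ u = vec (basis.getD i 0) ∧
      u.max = some ⟨i, h⟩ := by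
  obtain ⟨i, hi, hne, rfl⟩ := mem_bv.1 hu
  exact ⟨i, hi, hne, rfl, ((hg.2 i hi).resolve_left hne)⟩

theorem A_char (a : List Int) (i : Nat) (h : i < 30) :
    ((a.foldl (fun b x => insA b x 29) (List.replicate 30 (0:Int))).getD i 0 ≠ 0)
      ↔ LeadIn (a.map vec) ⟨i, h⟩ := by
  obtain ⟨hg, hc, hd⟩ := foldA_inv a [] (List.replicate 30 (0:Int)) goodBasis_init
    (by rw [bv_init]; intro u hu; exact absurd hu (List.not_mem_nil))
    (by intro y hy; exact absurd hy (List.not_mem_nil))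
  rw [List.nil_append] at hc hd
  set B := a.foldl (fun b x => insA b x 29) (List.replicate 30 (0:Int)) with hB
  constructor
  · intro hne
    exact ⟨vec (B.getD i 0), hc _ (mem_bv.2 ⟨i, h, hne, rfl⟩),
      (hg.2 i h).resolve_left hne⟩
  · rintro ⟨v, hv, hmax⟩
    have hvB : Spn (bv B) v := by
      refine Spn.mono ?_ hv
      intro g hgm
      obtain ⟨y, hy, rfl⟩ := List.mem_map.1 hgm
      exact hd y hy
    obtain ⟨s, hsub, hnd, rfl⟩ := spn_normal hvB
    have hsne : s ≠ [] := by
      rintro rfl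
      rw [show xorL [] = ∅ from rfl] at hmax
      simp at hmax
    have hpair : s.Pairwise (fun u w => u.max ≠ w.max) := by
      refine hnd.imp_of_mem ?_
      intro u w hu hw hne heq
      obtain ⟨i1, h1, _, hu1, hm1⟩ := bv_max hg (hsub u hu)
      obtain ⟨i2, h2, _, hw1, hm2⟩ := bv_max hg (hsub w hw)
      rw [hm1, hm2] at heq
      have : i1 = i2 := by
        have := Option.some_injective _ heq
        exact Fin.mk.inj_iff.1 this
      subst this
      exact hne (hu1.trans hw1.symm)
    have h0 : ∀ u ∈ s, u ≠ ∅ := by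
      intro u hu h0
      obtain ⟨i1, h1, _, _, hm1⟩ := bv_max hg (hsub u hu)
      rw [h0] at hm1
      simp at hm1
    obtain ⟨u, hus, hmu⟩ := xorL_max hsne hpair h0
    obtain ⟨i2, h2, hne2, _, hm2⟩ := bv_max hg (hsub u hus)
    rw [hmu, hm2] at hmax
    have : i2 = i := Fin.mk.inj_iff.1 (Option.some_injective _ hmax)
    subst this
    exact hne2

-- ===== B: stage characterization =====

-- the region of bit positions strictly below k
def Reg (k : Nat) : Finset (Fin 30) := Finset.univ.filter (fun j => j.val < k)

theorem vec_subset_reg {r : Int} {k : Nat}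
    (h : ∀ j, k ≤ j → j < 30 → tb r j = false) : vec r ⊆ Reg k := by
  intro b hb
  have hbt := mem_vec.1 hb
  simp only [Reg, Finset.mem_filter, Finset.mem_univ, true_and]
  by_contra hk
  rw [h b.val (by omega) b.isLt] at hbt
  exact Bool.false_ne_true hbt

-- pivot-found run of the stage fold
theorem stage_go_pv (i : Nat) : ∀ (l : List Int) (acc : List Int) (pv : Int), pv ≠ 0 →
    l.foldl (stepB i) (pv, acc) =
      (pv, acc ++ l.map (fun r => if tb r i = true then PySem.Int.bxor r pv else r)) := by
  intro l
  induction l with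
  | nil => intro acc pv hpv; simp
  | cons r l ih =>
      intro acc pv hpv
      rcases Bool.eq_false_or_eq_true (tb r i) with hr | hr
      · have hband : ¬ PySem.Int.band r ((1:Int) <<< i) = 0 := by
          intro hz; rw [(band_pow_eq_zero _ _).1 hz] at hr; exact Bool.false_ne_true hr
        rw [List.foldl_cons, show stepB i (pv, acc) r = (pv, acc ++ [PySem.Int.bxor r pv]) from by
          simp [stepB, hband, hpv], ih _ pv hpv]
        simp [hr]
      · rw [List.foldl_cons, show stepB i (pv, acc) r = (pv, acc ++ [r]) from by
          simp [stepB, (band_pow_eq_zero _ _).2 hr], ih _ pv hpv]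
        simp [hr]

-- full characterization of one stage: either no row has bit i, or the rows split at the
-- first row having bit i
theorem stageB_cases (i : Nat) : ∀ (rows acc : List Int),
    (rows.foldl (stepB i) (0, acc) = ((0:Int), acc ++ rows) ∧ ∀ r ∈ rows, tb r i = false) ∨
    (∃ l1 r0 l2, rows = l1 ++ r0 :: l2 ∧ (∀ r ∈ l1, tb r i = false) ∧ tb r0 i = true ∧
      rows.foldl (stepB i) (0, acc) =
        (r0, acc ++ l1 ++ l2.map (fun r => if tb r i = true then PySem.Int.bxor r r0 else r))) := by
  intro rows
  induction rows with
  | nil => intro acc; exact Or.inl ⟨by simp, by simp⟩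
  | cons r rows ih =>
      intro acc
      rcases Bool.eq_false_or_eq_true (tb r i) with hr | hr
      · have hband : ¬ PySem.Int.band r ((1:Int) <<< i) = 0 := by
          intro hz; rw [(band_pow_eq_zero _ _).1 hz] at hr; exact Bool.false_ne_true hr
        have hstep : stepB i (0, acc) r = (r, acc) := by
          simp [stepB, hband]
        refine Or.inr ⟨[], r, rows, rfl, by simp, hr, ?_⟩
        rw [List.foldl_cons, hstep, stage_go_pv i rows acc r (tb_ne_zero hr)]
        simp
      · have hstep : stepB i (0, acc) r = (0, acc ++ [r]) := by
          simp [stepB, (band_pow_eq_zero _ _).2 hr]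
        rcases ih (acc ++ [r]) with ⟨heq, hall⟩ | ⟨l1, r0, l2, hsplit, hl1, hr0, heq⟩
        · refine Or.inl ⟨?_, ?_⟩
          · rw [List.foldl_cons, hstep, heq]; simp
          · intro r' hr'
            rcases List.mem_cons.1 hr' with rfl | hr'
            · exact hr
            · exact hall r' hr'
        · refine Or.inr ⟨r :: l1, r0, l2, by simp [hsplit], ?_, hr0, ?_⟩
          · intro r' hr'
            rcases List.mem_cons.1 hr' with rfl | hr'
            · exact hr
            · exact hl1 r' hr'
          · rw [List.foldl_cons, hstep, heq]; simp

-- transfer of leading-bit positions below k across one elimination stage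
theorem lead_transfer {rows rest : List Int} {pv : Int} {k : Nat} (hk : k < 30)
    (hpv : tb pv k = true)
    (hrest : ∀ r ∈ rest, ∀ j, k ≤ j → j < 30 → tb r j = false)
    (hrestSub : ∀ u ∈ rest.map vec, Spn (rows.map vec) u)
    (hrowsSub : ∀ g ∈ rows.map vec, Spn (vec pv :: rest.map vec) g)
    {m : Fin 30} (hm : m.val < k) :
    LeadIn (rows.map vec) m ↔ LeadIn (rest.map vec) m := by
  constructor
  · rintro ⟨v, hv, hmax⟩
    have hv' : Spn (vec pv :: rest.map vec) v := Spn.mono hrowsSub hv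
    rcases Spn.cons_elim hv' with hv2 | hv2
    · exact ⟨v, hv2, hmax⟩
    · exfalso
      have hreg : symmDiff (vec pv) v ⊆ Reg k := by
        refine Spn.region ?_ hv2
        intro u hu
        obtain ⟨r, hr, rfl⟩ := List.mem_map.1 hu
        exact vec_subset_reg (hrest r hr)
      have hkv : (⟨k, hk⟩ : Fin 30) ∈ symmDiff (vec pv) v := by
        refine Finset.mem_symmDiff.2 (Or.inl ⟨mem_vec.2 hpv, ?_⟩)
        intro hkvmem
        have h1 := Finset.le_max hkvmem
        rw [hmax] at h1
        have h2 := WithBot.coe_le_coe.1 h1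
        simp only [Fin.le_def] at h2
        omega
      have := hreg hkv
      simp [Reg] at this
  · rintro ⟨v, hv, hmax⟩
    exact ⟨v, Spn.mono hrestSub hv, hmax⟩

theorem lead_none {rows : List Int} {k : Nat} (hk : k < 30)
    (hbound : ∀ r ∈ rows, ∀ j, k < j → j < 30 → tb r j = false)
    (hfree : ∀ r ∈ rows, tb r k = false) :
    ¬ LeadIn (rows.map vec) ⟨k, hk⟩ := by
  rintro ⟨v, hv, hmax⟩
  have hreg : v ⊆ Reg k := by
    refine Spn.region ?_ hv
    intro u hu
    obtain ⟨r, hr, rfl⟩ := List.mem_map.1 hu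
    refine vec_subset_reg ?_
    intro j h1 h2
    rcases eq_or_ne j k with rfl | hne
    · exact hfree r hr
    · exact hbound r hr j (by omega) h2
  have := hreg (Finset.mem_of_max hmax)
  simp [Reg] at this

theorem lead_yes {rows : List Int} {pv : Int} {k : Nat} (hk : k < 30)
    (hbound : ∀ r ∈ rows, ∀ j, k < j → j < 30 → tb r j = false)
    (hmem : pv ∈ rows) (hpv : tb pv k = true) :
    LeadIn (rows.map vec) ⟨k, hk⟩ :=
  ⟨vec pv, Spn.single (List.mem_map_of_mem hmem),
    vec_max_eq hk (hbound pv hmem) hpv⟩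

-- consolidated facts about one stage of B at bit k
theorem stage_facts {k : Nat} (hk : k < 30) {rows : List Int}
    (hbound : ∀ r ∈ rows, ∀ j, k < j → j < 30 → tb r j = false) :
    (stageB k rows = (0, rows) ∧ ¬ LeadIn (rows.map vec) ⟨k, hk⟩) ∨
    (∃ pv rest, stageB k rows = (pv, rest) ∧ pv ≠ 0 ∧
      LeadIn (rows.map vec) ⟨k, hk⟩ ∧
      (∀ r ∈ rest, ∀ j, k ≤ j → j < 30 → tb r j = false) ∧
      (∀ m : Fin 30, m.val < k → (LeadIn (rows.map vec) m ↔ LeadIn (rest.map vec) m))) := by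
  rcases stageB_cases k rows [] with ⟨heq, hall⟩ | ⟨l1, r0, l2, hsplit, hl1, hr0, heq⟩
  · exact Or.inl ⟨by simpa [stageB] using heq, lead_none hk hbound hall⟩
  · set f : Int → Int := fun r => if tb r k = true then PySem.Int.bxor r r0 else r with hf
    set rest : List Int := l1 ++ l2.map f with hrest
    have hstage : stageB k rows = (r0, rest) := by simpa [stageB, hrest] using heq
    have hr0mem : r0 ∈ rows := by rw [hsplit]; exact List.mem_append_right _ List.mem_cons_self
    have hl1mem : ∀ r ∈ l1, r ∈ rows := by
      intro r hr; rw [hsplit]; exact List.mem_append_left _ hr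
    have hl2mem : ∀ r ∈ l2, r ∈ rows := by
      intro r hr; rw [hsplit]
      exact List.mem_append_right _ (List.mem_cons_of_mem _ hr)
    have hrestb : ∀ r ∈ rest, ∀ j, k ≤ j → j < 30 → tb r j = false := by
      intro r hr j hj1 hj2
      rcases List.mem_append.1 hr with hr | hr
      · rcases eq_or_lt_of_le hj1 with rfl | hlt
        · exact hl1 r hr
        · exact hbound r (hl1mem r hr) j hlt hj2
      · obtain ⟨r', hr', rfl⟩ := List.mem_map.1 hr
        rcases Bool.eq_false_or_eq_true (tb r' k) with hb | hb
        · have hfr : f r' = PySem.Int.bxor r' r0 := by simp [hf, hb]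
          rw [hfr, tb_bxor]
          rcases eq_or_lt_of_le hj1 with rfl | hlt
          · rw [hb, hr0]; rfl
          · rw [hbound r' (hl2mem r' hr') j hlt hj2, hbound r0 hr0mem j hlt hj2]; rfl
        · have hfr : f r' = r' := by simp [hf, hb]
          rw [hfr]
          rcases eq_or_lt_of_le hj1 with rfl | hlt
          · exact hb
          · exact hbound r' (hl2mem r' hr') j hlt hj2
    have hrestSub : ∀ u ∈ rest.map vec, Spn (rows.map vec) u := by
      intro u hu
      obtain ⟨r, hr, rfl⟩ := List.mem_map.1 hu
      rcases List.mem_append.1 hr with hr | hr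
      · exact Spn.single (List.mem_map_of_mem (hl1mem r hr))
      · obtain ⟨r', hr', rfl⟩ := List.mem_map.1 hr
        rcases Bool.eq_false_or_eq_true (tb r' k) with hb | hb
        · have hfr : f r' = PySem.Int.bxor r' r0 := by simp [hf, hb]
          rw [hfr, vec_bxor]
          exact Spn.xor (Spn.single (List.mem_map_of_mem (hl2mem r' hr')))
            (Spn.single (List.mem_map_of_mem hr0mem))
        · have hfr : f r' = r' := by simp [hf, hb]
          rw [hfr]
          exact Spn.single (List.mem_map_of_mem (hl2mem r' hr'))
    have hrowsSub : ∀ g ∈ rows.map vec, Spn (vec r0 :: rest.map vec) g := by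
      intro g hg
      obtain ⟨r, hr, rfl⟩ := List.mem_map.1 hg
      rw [hsplit] at hr
      rcases List.mem_append.1 hr with hr | hr
      · refine Spn.single (List.mem_cons_of_mem _ ?_)
        exact List.mem_map_of_mem (List.mem_append_left _ hr)
      · rcases List.mem_cons.1 hr with rfl | hr
        · exact Spn.single List.mem_cons_self
        · rcases Bool.eq_false_or_eq_true (tb r k) with hb | hb
          · have hfr : f r = PySem.Int.bxor r r0 := by simp [hf, hb]
            have hmem2 : vec (PySem.Int.bxor r r0) ∈ (rest.map vec) := by
              rw [← hfr, hrest]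
              exact List.mem_map_of_mem (List.mem_append_right _ (List.mem_map_of_mem hr))
            have := Spn.xor (Spn.single (List.mem_cons_of_mem _ hmem2))
              (Spn.single (List.mem_cons_self (a := vec r0)))
            rw [vec_bxor] at this
            simpa [symmDiff_assoc, symmDiff_self, symmDiff_bot, ← Finset.bot_eq_empty]
              using this
          · refine Spn.single (List.mem_cons_of_mem _ ?_)
            have hfr : f r = r := by simp [hf, hb]
            rw [← hfr, hrest]
            exact List.mem_map_of_mem (List.mem_append_right _ (List.mem_map_of_mem hr))
    refine Or.inr ⟨r0, rest, hstage, tb_ne_zero hr0, lead_yes hk hbound hr0mem hr0, hrestb, ?_⟩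
    intro m hm
    exact lead_transfer hk hr0 hrestb hrestSub hrowsSub hm

-- main elimination invariant for B's outer loop
theorem elimB_spec : ∀ (k : Nat), k < 30 → ∀ (rows : List Int) (pivot : List Bool),
    pivot.length = 30 →
    (∀ r ∈ rows, ∀ j, k < j → j < 30 → tb r j = false) →
    (∀ i, i ≤ k → pivot.getD i false = false) →
    (∀ i, k < i → (elimB rows pivot k).1.getD i false = pivot.getD i false) ∧
    (∀ i, ∀ h : i < 30, i ≤ k →
      ((elimB rows pivot k).1.getD i false = true ↔ LeadIn (rows.map vec) ⟨i, h⟩)) := by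
  intro k
  induction k with
  | zero =>
      intro _ rows pivot hlen hbound hfalse
      rcases stage_facts (by norm_num) hbound with ⟨hstage, hnone⟩ |
        ⟨pv, rest, hstage, hpv, hyes, _, _⟩
      · have he : elimB rows pivot 0 = (pivot, rows) := by
          show (if (stageB 0 rows).1 ≠ 0 then pivot.set 0 true else pivot,
            (stageB 0 rows).2) = (pivot, rows)
          rw [hstage]; simp
        rw [he]
        constructor
        · intro i _; rfl
        · intro i h hi
          interval_cases i
          rw [hfalse 0 (by norm_num)]
          simp only [Bool.false_eq_true, false_iff]
          exact hnone
      · have he : elimB rows pivot 0 = (pivot.set 0 true, rest) := by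
          show (if (stageB 0 rows).1 ≠ 0 then pivot.set 0 true else pivot,
            (stageB 0 rows).2) = (pivot.set 0 true, rest)
          rw [hstage]; simp [hpv]
        rw [he]
        constructor
        · intro i hi
          exact getD_set_ne (by omega) true
        · intro i h hi
          interval_cases i
          rw [getD_set_self (by rw [hlen]; norm_num) true]
          simpa using hyes
  | succ j ih =>
      intro hk rows pivot hlen hbound hfalse
      have hj30 : j < 30 := by omega
      rcases stage_facts hk hbound with ⟨hstage, hnone⟩ |
        ⟨pv, rest, hstage, hpv, hyes, hrestb, htrans⟩
      · have he : elimB rows pivot (j+1) = elimB rows pivot j := by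
          show elimB (stageB (j+1) rows).2
            (if (stageB (j+1) rows).1 ≠ 0 then pivot.set (j+1) true else pivot) j = _
          rw [hstage]; simp
        rw [he]
        have hbound' : ∀ r ∈ rows, ∀ j', j < j' → j' < 30 → tb r j' = false := by
          intro r hr j' h1 h2
          rcases eq_or_ne j' (j+1) with rfl | hne
          · by_contra hb
            exact hnone (lead_yes hk hbound hr (by
              rcases Bool.eq_false_or_eq_true (tb r (j+1)) with h | h
              · exact h
              · exact absurd h hb))
          · exact hbound r hr j' (by omega) h2
        obtain ⟨ih1, ih2⟩ := ih hj30 rows pivot hlen hbound' (fun i hi => hfalse i (by omega))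
        constructor
        · intro i hi
          rcases eq_or_ne i (j+1) with rfl | hne
          · rw [ih1 (j+1) (by omega)]
          · exact ih1 i (by omega)
        · intro i h hi
          rcases eq_or_ne i (j+1) with rfl | hne
          · rw [ih1 (j+1) (by omega), hfalse (j+1) (le_refl _)]
            simp only [Bool.false_eq_true, false_iff]
            exact hnone
          · exact ih2 i h (by omega)
      · have he : elimB rows pivot (j+1) = elimB rest (pivot.set (j+1) true) j := by
          show elimB (stageB (j+1) rows).2
            (if (stageB (j+1) rows).1 ≠ 0 then pivot.set (j+1) true else pivot) j = _
          rw [hstage]; simp [hpv]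
        rw [he]
        have hrestb' : ∀ r ∈ rest, ∀ j', j < j' → j' < 30 → tb r j' = false := by
          intro r hr j' h1 h2
          exact hrestb r hr j' (by omega) h2
        have hfalse' : ∀ i, i ≤ j → (pivot.set (j+1) true).getD i false = false := by
          intro i hi
          rw [getD_set_ne (by omega) true]
          exact hfalse i (by omega)
        obtain ⟨ih1, ih2⟩ := ih hj30 rest (pivot.set (j+1) true)
          (by rw [List.length_set]; exact hlen) hrestb' hfalse'
        constructor
        · intro i hi
          rcases eq_or_ne i (j+1) with rfl | hne
          · rw [ih1 (j+1) (by omega)] at *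
            omega
          · rw [ih1 i (by omega), getD_set_ne (by omega) true]
        · intro i h hi
          rcases eq_or_ne i (j+1) with rfl | hne
          · rw [ih1 (j+1) (by omega), getD_set_self (by rw [hlen]; omega) true]
            simpa using hyes
          · rw [ih2 i h (by omega)]
            exact (htrans ⟨i, h⟩ (by simpa using by omega : (⟨i, h⟩ : Fin 30).val < j+1)).symm

theorem B_char (a : List Int) (i : Nat) (h : i < 30) :
    ((elimB a (List.replicate 30 false) 29).1.getD i false = true ↔ LeadIn (a.map vec) ⟨i, h⟩) := by
  obtain ⟨_, h2⟩ := elimB_spec 29 (by norm_num) a (List.replicate 30 false) (by simp)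
    (fun r _ j h1 h2 => absurd h1 (by omega))
    (by
      intro i hi
      rcases lt_or_ge i 30 with hlt | hge
      · rw [List.getD_eq_getElem?_getD, List.getElem?_replicate, if_pos hlt]; rfl
      · rw [List.getD_eq_getElem?_getD, List.getElem?_eq_none (by simpa using hge)]; rfl)
  exact h2 i h (by omega)

-- the two final scan loops agree given pointwise agreement of the pivot tests
theorem find_eq (bf : List Int) (pvt : List Bool)
    (hpt : ∀ m, m < 30 → ((bf.getD m 0 = 0) ↔ (pvt.getD m false = false))) :
    ∀ n i, 30 - i ≤ n → findA bf i = findB pvt i := by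
  intro n
  induction n with
  | zero =>
      intro i hi
      rw [findA, findB, if_neg (by omega), if_neg (by omega)]
  | succ n ihn =>
      intro i hi
      rcases lt_or_ge i 30 with hlt | hge
      · rw [findA, findB, if_pos hlt, if_pos hlt]
        rcases Bool.eq_false_or_eq_true (pvt.getD i false) with hb | hb
        · rw [if_neg (fun h0 => by rw [(hpt i hlt).1 h0] at hb; exact Bool.false_ne_true hb),
            hb]
          rw [show (!true) = false from rfl, if_neg Bool.false_ne_true]
          exact ihn (i+1) (by omega)
        · rw [if_pos ((hpt i hlt).2 hb), hb]
          rfl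
      · rw [findA, findB, if_neg (by omega), if_neg (by omega)]

-- ===== VERDICT (by name: the statement is the Claim_ definition above) =====
theorem sol_009_spec : Claim_equal_sol_009 := by
  intro a _
  show sol_009 a = sol_009_alt a
  unfold sol_009 sol_009_alt
  refine find_eq _ _ ?_ 30 0 (by omega)
  intro m hm
  have hA := A_char a m hm
  have hB := B_char a m hm
  constructor
  · intro h0
    rcases Bool.eq_false_or_eq_true
        ((elimB a (List.replicate 30 false) 29).1.getD m false) with hb | hb
    · exact absurd (hA.2 (hB.1 hb)) (fun hcon => hcon h0)
    · exact hb
  · intro hf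
    by_contra hne
    rw [(hB.2 (hA.1 hne))] at hf
    exact Bool.true_eq_false ▸ hf
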